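-- pv_equiv track=rewrite | github.com/CMPE-195-Group-24/senior-project-195 | software/test.py | min_remaining_length
-- ===== SOURCE A (Python) =====
-- def min_remaining_length(seq: str) -> int:
--     a_count = 0
--     b_count = 0
--
--     for char in seq:
--         if char == 'A':
--             a_count += 1
--         elif char == 'B':
--             if b_count > 0:
--                 b_count -= 1
--             else:
--                 b_count += 1
--
--     return a_count + b_count
-- ===== SOURCE B (Python) =====
-- def _summary(seq, lo, hi):
--     # (number of 'A' in seq[lo:hi], parity of number of 'B' in seq[lo:hi])
--     if hi - lo == 0:
--         return (0, 0)
--     if hi - lo == 1: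
--         c = seq[lo]
--         if c == 'A':
--             return (1, 0)
--         if c == 'B':
--             return (0, 1)
--         return (0, 0)
--     mid = (lo + hi) // 2
--     a1, p1 = _summary(seq, lo, mid)
--     a2, p2 = _summary(seq, mid, hi)
--     return (a1 + a2, p1 ^ p2)
--
--
-- def min_remaining_length(seq: str) -> int:
--     a, p = _summary(seq, 0, len(seq))
--     return a + p
-- ===== Notes on version B (the rewrite author's own statement) =====
-- stated objective: alternative
-- what changed: Replaced A's single left-to-right loop with a stateful toggle by a divide-and-conquer: each half is summarised as (A-count, B-parity) and halves are merged with addition/xor; the top-level result is A-count plus B-parity.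
import Mathlib
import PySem

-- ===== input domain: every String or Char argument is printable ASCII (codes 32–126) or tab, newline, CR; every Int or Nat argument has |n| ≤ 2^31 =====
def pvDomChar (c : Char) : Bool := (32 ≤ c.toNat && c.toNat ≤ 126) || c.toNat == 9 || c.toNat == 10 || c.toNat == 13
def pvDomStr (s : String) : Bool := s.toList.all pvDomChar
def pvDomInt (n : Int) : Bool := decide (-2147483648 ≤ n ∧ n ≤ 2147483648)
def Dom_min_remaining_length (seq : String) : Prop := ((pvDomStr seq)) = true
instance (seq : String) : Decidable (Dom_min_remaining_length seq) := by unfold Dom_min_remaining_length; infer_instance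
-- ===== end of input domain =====

-- B replaces A's left-to-right loop with a toggle by a divide-and-conquer that merges
-- (A-count, B-parity) summaries of the two halves (objective: alternative).

-- ===== PORT A =====
-- the body of A's for-loop, as a helper (state (a_count, b_count))
def min_remaining_length_step (st : Int × Int) (char : Char) : Int × Int :=
  let (a_count, b_count) := st
  if char = 'A' then (a_count + 1, b_count)
  else if char = 'B' then
    if b_count > 0 then (a_count, b_count - 1) else (a_count, b_count + 1)
  else (a_count, b_count)

-- literal transliteration of A: the loop over the characters, then a_count + b_count
def min_remaining_length (seq : String) : Int :=
  let st := seq.toList.foldl min_remaining_length_step (0, 0)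
  st.1 + st.2

-- ===== PORT B =====
-- Source B's _summary recurses on index range [lo, hi) of the string, splitting at the
-- midpoint; the port recurses on the corresponding character list, splitting it with
-- take/drop at length / 2 (the same midpoint split); p1 ^ p2 on {0,1} is ported as
-- 'if p1 = p2 then 0 else 1'.
def min_remaining_length_summary : List Char → Int × Int
  | [] => (0, 0)
  | [c] => if c = 'A' then (1, 0) else if c = 'B' then (0, 1) else (0, 0)
  | x :: y :: t =>
    let mid := (x :: y :: t).length / 2
    let s1 := min_remaining_length_summary ((x :: y :: t).take mid)
    let s2 := min_remaining_length_summary ((x :: y :: t).drop mid)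
    (s1.1 + s2.1, if s1.2 = s2.2 then 0 else 1)
  termination_by l => l.length
  decreasing_by
  · simp [List.length_take]; omega
  · simp [List.length_drop]; omega

def min_remaining_length_alt (seq : String) : Int :=
  let s := min_remaining_length_summary seq.toList
  s.1 + s.2

-- ===== PRECONDITION & SPEC =====
def Spec_min_remaining_length (seq : String) (out : Int) : Prop := out = min_remaining_length_alt seq
instance (seq : String) (out : Int) : Decidable (Spec_min_remaining_length seq out) := by unfold Spec_min_remaining_length; infer_instance

-- ===== CLAIM (what is proved, stated in full; the proofs are below) =====
def Claim_equal_min_remaining_length : Prop := ∀ (seq : String), Dom_min_remaining_length seq → Spec_min_remaining_length seq (min_remaining_length seq)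

-- ===== LEMMAS AND PROOFS =====

-- A's loop invariant: starting from any (a, b) with b ∈ {0,1}, the fold returns
-- (a + #A, (b + #B) % 2)
theorem pv_loop_char (l : List Char) :
    ∀ (a b : Int), b = 0 ∨ b = 1 →
      l.foldl min_remaining_length_step (a, b)
        = (a + (l.count 'A' : Int), (b + (l.count 'B' : Int)) % 2) := by
  induction l with
  | nil =>
    intro a b hb
    simp only [List.foldl_nil, List.count_nil, Nat.cast_zero, add_zero]
    exact Prod.ext rfl (by omega)
  | cons c t ih =>
    intro a b hb
    simp only [List.foldl_cons]
    by_cases hA : c = 'A'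
    · subst hA
      rw [show min_remaining_length_step (a, b) 'A' = (a + 1, b) from rfl, ih (a + 1) b hb]
      simp only [List.count_cons, Prod.mk.injEq]
      refine ⟨by push_cast; simp; omega, by simp⟩
    · by_cases hB : c = 'B'
      · subst hB
        rcases hb with hb | hb <;> subst hb
        · rw [show min_remaining_length_step (a, 0) 'B' = (a, 1) from
            by simp [min_remaining_length_step], ih a 1 (Or.inr rfl)]
          simp only [List.count_cons, Prod.mk.injEq]
          refine ⟨by simp, by push_cast; simp; omega⟩
        · rw [show min_remaining_length_step (a, 1) 'B' = (a, 0) from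
            by simp [min_remaining_length_step], ih a 0 (Or.inl rfl)]
          simp only [List.count_cons, Prod.mk.injEq]
          refine ⟨by simp, by push_cast; simp; omega⟩
      · rw [show min_remaining_length_step (a, b) c = (a, b) from
          by simp [min_remaining_length_step, hA, hB], ih a b hb]
        simp [hA, hB]

-- B's divide-and-conquer summary computes (#A, #B % 2)
theorem pv_summary_eq (l : List Char) :
    min_remaining_length_summary l = ((l.count 'A' : Int), (l.count 'B' : Int) % 2) := by
  fun_induction min_remaining_length_summary l with
  | case1 => simp
  | case2 => simp
  | case3 => simp
  | case4 c h1 h2 => simp [h1, h2]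
  | case5 x y t mid s1 s2 iht ihd =>
    simp only [s1, s2, iht, ihd]
    have hcA := congrArg (List.count 'A') (List.take_append_drop mid (x :: y :: t))
    have hcB := congrArg (List.count 'B') (List.take_append_drop mid (x :: y :: t))
    rw [List.count_append] at hcA hcB
    refine Prod.ext ?_ ?_
    · simp only; push_cast [← hcA]; ring
    · simp only; split_ifs <;> (push_cast [← hcB]; omega)

-- ===== VERDICT (by name: the statement is the Claim_ definition above) =====
theorem min_remaining_length_spec : Claim_equal_min_remaining_length := by
  intro seq _
  unfold Spec_min_remaining_length min_remaining_length min_remaining_length_alt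
  rw [pv_loop_char seq.toList 0 0 (Or.inl rfl), pv_summary_eq]
  simp
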